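-- pv_equiv track=rewrite | github.com/ggarcadeV4/ArcadeAssistantPush | backend/services/scorekeeper/service_optimized.py | _alternate_high_low_optimized
-- ===== SOURCE A (Python) =====
-- from collections import deque
-- from typing import List, Dict, Optional, AsyncGenerator, Tuple, Set
--
-- def _alternate_high_low_optimized(sorted_players: List[str]) -> List[str]:
--     """Optimized alternation using deque for O(1) operations."""
--     if not sorted_players:
--         return []
--
--     players_deque = deque(sorted_players)
--     balanced = []
--
--     while players_deque:
--         balanced.append(players_deque.popleft())  # O(1)
--         if players_deque:
--             balanced.append(players_deque.pop())   # O(1)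
--
--     return balanced
-- ===== SOURCE B (Python) =====
-- from typing import List
--
-- def _alternate_high_low_optimized(sorted_players: List[str]) -> List[str]:
--     """Split into front half and reversed back half, then interleave them."""
--     n = len(sorted_players)
--     front = sorted_players[:(n + 1) // 2]
--     back = sorted_players[(n + 1) // 2:][::-1]
--     result = []
--     for k in range(len(front)):
--         result.append(front[k])
--         if k < len(back):
--             result.append(back[k])
--     return result
-- ===== Notes on version B (the rewrite author's own statement) =====
-- stated objective: alternative
-- what changed: Replaces the stateful deque pop-front/pop-back loop with slicing the list into a front half and a reversed back half, then interleaving the two halves.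
import Mathlib
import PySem

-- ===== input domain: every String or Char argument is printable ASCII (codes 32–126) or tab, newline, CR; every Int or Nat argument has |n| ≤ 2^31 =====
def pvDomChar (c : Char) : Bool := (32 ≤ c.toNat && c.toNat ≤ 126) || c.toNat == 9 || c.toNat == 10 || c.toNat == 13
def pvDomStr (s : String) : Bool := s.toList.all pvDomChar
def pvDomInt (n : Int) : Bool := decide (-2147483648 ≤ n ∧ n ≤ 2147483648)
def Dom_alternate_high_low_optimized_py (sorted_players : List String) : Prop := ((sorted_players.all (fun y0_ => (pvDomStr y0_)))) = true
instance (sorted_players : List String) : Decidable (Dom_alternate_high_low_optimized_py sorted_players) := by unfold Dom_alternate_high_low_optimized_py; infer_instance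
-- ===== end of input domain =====

-- B is an alternative decomposition: build the front half and the reversed back half, then interleave.

-- ===== PORT A =====
-- the while loop over the deque: popleft, then (if nonempty) pop from the right
def pvALoop : List String → List String
  | [] => []
  | [x] => [x]
  | x :: y :: rest =>
      x :: (y :: rest).getLast (by simp) :: pvALoop ((y :: rest).dropLast)
  termination_by l => l.length
  decreasing_by simp [List.length_dropLast]

def alternate_high_low_optimized_py (sorted_players : List String) : List String :=
  if sorted_players = [] then [] else pvALoop sorted_players

-- ===== PORT B =====
-- the index loop 'for k in range(len(front)): append front[k]; if k < len(back): append back[k]'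
def pvInterleave : List String → List String → List String
  | [], _ => []
  | f :: fs, [] => f :: pvInterleave fs []
  | f :: fs, b :: bs => f :: b :: pvInterleave fs bs

def alternate_high_low_optimized_py_alt (sorted_players : List String) : List String :=
  let n := sorted_players.length
  -- slices with nonnegative bounds: [:k] = take k, [k:] = drop k, [::-1] = reverse
  let front := sorted_players.take ((n + 1) / 2)
  let back := (sorted_players.drop ((n + 1) / 2)).reverse
  pvInterleave front back

-- ===== PRECONDITION & SPEC =====
def Spec_alternate_high_low_optimized_py (sorted_players : List String) (out : List String) : Prop := out = alternate_high_low_optimized_py_alt sorted_players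
instance (sorted_players : List String) (out : List String) : Decidable (Spec_alternate_high_low_optimized_py sorted_players out) := by unfold Spec_alternate_high_low_optimized_py; infer_instance

-- ===== CLAIM (what is proved, stated in full; the proofs are below) =====
def Claim_equal_alternate_high_low_optimized_py : Prop := ∀ (sorted_players : List String), Dom_alternate_high_low_optimized_py sorted_players → Spec_alternate_high_low_optimized_py sorted_players (alternate_high_low_optimized_py sorted_players)

-- ===== LEMMAS AND PROOFS =====

theorem pvALoop_eq_interleave (xs : List String) :
    pvALoop xs = pvInterleave (xs.take ((xs.length + 1) / 2)) ((xs.drop ((xs.length + 1) / 2)).reverse) := by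
  induction xs using pvALoop.induct with
  | case1 => simp [pvALoop, pvInterleave]
  | case2 x => simp [pvALoop, pvInterleave]
  | case3 x y rest ih =>
      have hne : (y :: rest) ≠ [] := by simp
      -- write the tail as ys ++ [z]
      obtain ⟨ys, z, hyz⟩ : ∃ ys z, y :: rest = ys ++ [z] :=
        ⟨(y :: rest).dropLast, (y :: rest).getLast hne, (List.dropLast_append_getLast hne).symm⟩
      have hdl : (y :: rest).dropLast = ys := by rw [hyz]; simp
      have hgl : (y :: rest).getLast hne = z := by
        have := List.getLast_congr (l₁ := y :: rest) (l₂ := ys ++ [z]) hne (by simp) hyz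
        simpa using this
      have hlen : (y :: rest).length = ys.length + 1 := by rw [hyz]; simp
      have hj : ((x :: y :: rest).length + 1) / 2 = (ys.length + 1) / 2 + 1 := by
        simp only [List.length_cons, hlen]; omega
      have hjle : (ys.length + 1) / 2 ≤ ys.length := by omega
      rw [pvALoop, hdl, hgl]
      rw [hdl] at ih
      rw [ih, hj]
      rw [show (x :: y :: rest : List String) = x :: (ys ++ [z]) from by rw [hyz]]
      rw [List.take_succ_cons, List.drop_succ_cons,
          List.take_append_of_le_length hjle, List.drop_append_of_le_length hjle]
      simp [pvInterleave]

-- ===== VERDICT (by name: the statement is the Claim_ definition above) =====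
theorem alternate_high_low_optimized_py_spec : Claim_equal_alternate_high_low_optimized_py := by
  intro xs _
  unfold Spec_alternate_high_low_optimized_py alternate_high_low_optimized_py alternate_high_low_optimized_py_alt
  split
  · subst ‹xs = []›; simp [pvInterleave]
  · exact pvALoop_eq_interleave xs
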